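-- pv_equiv track=rewrite | github.com/yilinwu123/summarization | research_openrouter.py | slice_by_spans
-- ===== SOURCE A (Python) =====
-- from typing import Any, Dict, List, Optional, Tuple
--
-- def slice_by_spans(
--     text: str,
--     spans: List[Tuple[int, int]],
--     window: int = 200
-- ) -> str:
--     if not spans:
--         return text
--
--     intervals = []
--     n = len(text)
--     for s, e in spans:
--         s2 = max(0, s - window)
--         e2 = min(n, e + window)
--         intervals.append((s2, e2))
--
--     intervals.sort()
--     merged = []
--     for s, e in intervals:
--         if not merged or s > merged[-1][1]:
--             merged.append([s, e])
--         else: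
--             merged[-1][1] = max(merged[-1][1], e)
--
--     chunks = [text[s:e] for s, e in merged]
--
--     return "\n...\n".join(chunks)
-- ===== SOURCE B (Python) =====
-- def slice_by_spans(text, spans, window=200):
--     if not spans:
--         return text
--     n = len(text)
--     todo = [(max(0, s - window), min(n, e + window)) for s, e in spans]
--     chunks = []
--     while todo:
--         s, e = min(todo)
--         todo.remove((s, e))
--         # grow e to the closure of everything transitively reachable from [s, e]
--         changed = True
--         while changed:
--             changed = False
--             for s2, e2 in todo:
--                 if s2 <= e and e2 > e:
--                     e = e2
--                     changed = True
--         chunks.append(text[s:e])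
--         todo = [iv for iv in todo if iv[0] > e]
--     return "\n...\n".join(chunks)
-- ===== Notes on version B (the rewrite author's own statement) =====
-- stated objective: alternative
-- what changed: A sorts the padded intervals and does one linear merge scan mutating the last merged interval; B never sorts: it repeatedly extracts the lexicographically minimal remaining interval, grows its end to a transitive-overlap closure by repeated passes over the remaining intervals, emits that chunk, and drops the absorbed intervals.
import Mathlib
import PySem

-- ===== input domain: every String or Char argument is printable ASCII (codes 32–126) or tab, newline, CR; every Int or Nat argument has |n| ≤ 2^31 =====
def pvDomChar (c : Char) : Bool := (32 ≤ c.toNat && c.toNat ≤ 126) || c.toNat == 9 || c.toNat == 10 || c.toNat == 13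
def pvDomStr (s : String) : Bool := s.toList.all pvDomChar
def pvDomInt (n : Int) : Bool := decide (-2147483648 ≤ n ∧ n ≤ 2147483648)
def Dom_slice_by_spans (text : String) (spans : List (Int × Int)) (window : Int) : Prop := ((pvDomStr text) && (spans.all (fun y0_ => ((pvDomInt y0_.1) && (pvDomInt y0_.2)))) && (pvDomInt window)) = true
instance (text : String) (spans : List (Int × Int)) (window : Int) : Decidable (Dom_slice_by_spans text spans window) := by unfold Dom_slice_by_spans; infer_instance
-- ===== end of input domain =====

-- B replaces A's sort + linear merge scan by a sort-free strategy: repeatedly extract the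
-- lexicographically minimal remaining interval, grow its end to a transitive-overlap closure by
-- repeated passes over the remaining intervals, emit that chunk and drop the absorbed intervals.

-- ===== PORT A =====
-- one iteration of A's merge loop: read merged[-1], append or overwrite-last
def pvMergeStep (merged : List (Int × Int)) (p : Int × Int) : List (Int × Int) :=
  match merged.getLast? with
  | none => merged ++ [p]
  | some q => if p.1 > q.2 then merged ++ [p] else merged.dropLast ++ [(q.1, max q.2 p.2)]

def slice_by_spans (text : String) (spans : List (Int × Int)) (window : Int) : String :=
  if spans = [] then text else
  let n : Int := PySem.Str.len text
  let intervals := spans.foldl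
    (fun acc p => acc ++ [(max 0 (p.1 - window), min n (p.2 + window))]) ([] : List (Int × Int))
  let ivs := PySem.List.sorted2 intervals (·.1) (·.2)
  let merged := ivs.foldl pvMergeStep []
  let chunks := merged.map (fun p => PySem.Str.slice text (some p.1) (some p.2))
  PySem.Str.join "\n...\n" chunks

-- ===== PORT B =====
-- one full `for s2, e2 in todo` pass of B's inner closure loop; the flag is `changed`
def pvGrow (todo : List (Int × Int)) (e : Int) : Int × Bool :=
  todo.foldl (fun st p => if p.1 ≤ st.1 ∧ p.2 > st.1 then (p.2, true) else st) (e, false)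

-- B's `while changed` loop; the fuel `todo.length + 1` is enough: each changing pass strictly
-- shrinks the number of intervals whose end exceeds the running end (proved below)
def pvClosure : Nat → List (Int × Int) → Int → Int
  | 0, _, e => e
  | fuel + 1, todo, e =>
    let g := pvGrow todo e
    if g.2 then pvClosure fuel todo g.1 else e

-- `min(todo)` is a member of `todo` (needed by pvLoop's termination argument)
theorem pv_min2_mem_aux {α : Type} (step : Option α → α → Option α)
    (hstep : ∀ acc x, step acc x = acc ∨ step acc x = some x) :
    ∀ (l : List α) (acc : Option α) (m : α), l.foldl step acc = some m → acc = some m ∨ m ∈ l := by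
  intro l
  induction l with
  | nil => intro acc m h; exact Or.inl h
  | cons x l ih =>
    intro acc m h
    rcases ih (step acc x) m h with h1 | h1
    · rcases hstep acc x with h2 | h2
      · exact Or.inl (h2 ▸ h1)
      · rw [h2] at h1; exact Or.inr (by simp [Option.some_inj.mp h1])
    · exact Or.inr (List.mem_cons_of_mem x h1)

theorem pv_min2_mem (todo : List (Int × Int)) (m : Int × Int)
    (h : PySem.List.min2? todo (fun p => p.1) (fun p => p.2) = some m) : m ∈ todo := by
  unfold PySem.List.min2? at h
  rcases pv_min2_mem_aux _
    (by
      intro acc x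
      cases acc with
      | none => exact Or.inr rfl
      | some a =>
        dsimp only
        split
        · exact Or.inr rfl
        · exact Or.inl rfl)
    todo none m h with h1 | h1
  · cases h1
  · exact h1

-- B's outer `while todo:` loop, one cons per iteration
def pvLoop (text : String) (todo : List (Int × Int)) : List String :=
  match hm : PySem.List.min2? todo (fun p => p.1) (fun p => p.2) with
  | none => []
  | some m =>
    -- todo.remove((s, e)): never none, since m ∈ todo
    let todo1 := (PySem.List.remove? todo m).getD []
    let E := pvClosure (todo1.length + 1) todo1 m.2
    PySem.Str.slice text (some m.1) (some E) ::
      pvLoop text (todo1.filter (fun p => decide (p.1 > E)))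
termination_by todo.length
decreasing_by
  have hmem := pv_min2_mem todo m hm
  have h1 : (PySem.List.remove? todo m).getD [] = todo.erase m := by
    rw [PySem.List.remove?_eq_some_erase todo m hmem]; rfl
  simp only [h1]
  calc ((todo.erase m).filter _).length ≤ (todo.erase m).length := List.length_filter_le _ _
    _ < todo.length := by
        have := List.length_erase_of_mem hmem
        have : (todo.erase m).length = todo.length - 1 := this
        have hpos : 0 < todo.length := List.length_pos_of_mem hmem
        omega

def slice_by_spans_alt (text : String) (spans : List (Int × Int)) (window : Int) : String :=
  if spans = [] then text else
  let n : Int := PySem.Str.len text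
  let todo := spans.map (fun p => (max 0 (p.1 - window), min n (p.2 + window)))
  PySem.Str.join "\n...\n" (pvLoop text todo)

-- ===== PRECONDITION & SPEC =====
def Spec_slice_by_spans (text : String) (spans : List (Int × Int)) (window : Int) (out : String) : Prop := out = slice_by_spans_alt text spans window
instance (text : String) (spans : List (Int × Int)) (window : Int) (out : String) : Decidable (Spec_slice_by_spans text spans window out) := by unfold Spec_slice_by_spans; infer_instance

-- ===== CLAIM (what is proved, stated in full; the proofs are below) =====
def Claim_equal_slice_by_spans : Prop := ∀ (text : String) (spans : List (Int × Int)) (window : Int), Dom_slice_by_spans text spans window → Spec_slice_by_spans text spans window (slice_by_spans text spans window)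

-- ===== LEMMAS AND PROOFS =====

-- lexicographic order on pairs (Python's tuple comparison)
def pvLexLe (a b : Int × Int) : Prop := a.1 < b.1 ∨ (a.1 = b.1 ∧ a.2 ≤ b.2)

theorem pvLexLe_refl (a : Int × Int) : pvLexLe a a := Or.inr ⟨rfl, le_refl _⟩

theorem pvLexLe_trans {a b c : Int × Int} (h1 : pvLexLe a b) (h2 : pvLexLe b c) : pvLexLe a c := by
  unfold pvLexLe at *; omega

theorem pvLexLe_antisymm {a b : Int × Int} (h1 : pvLexLe a b) (h2 : pvLexLe b a) : a = b := by
  unfold pvLexLe at *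
  have : a.1 = b.1 ∧ a.2 = b.2 := by omega
  exact Prod.ext_iff.mpr this

-- the Boolean "strictly before" used by sorted2/min2? on tuple keys
def pvBefore (a b : Int × Int) : Bool :=
  decide (a.1 < b.1) || (!decide (b.1 < a.1) && decide (a.2 < b.2))

theorem pvBefore_true {a b : Int × Int} (h : pvBefore a b = true) : pvLexLe a b := by
  unfold pvBefore at h; unfold pvLexLe; simp at h; omega

theorem pvBefore_false {a b : Int × Int} (h : pvBefore a b = false) : pvLexLe b a := by
  unfold pvBefore at h; unfold pvLexLe; simp at h; omega

theorem pv_sorted2_eq_foldl (l : List (Int × Int)) :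
    PySem.List.sorted2 l (fun p => p.1) (fun p => p.2) false =
      l.foldl (fun acc x => PySem.List.insertBy pvBefore x acc) [] := rfl

theorem pv_insertBy_pairwise (x : Int × Int) (ys : List (Int × Int))
    (h : ys.Pairwise pvLexLe) : (PySem.List.insertBy pvBefore x ys).Pairwise pvLexLe := by
  induction ys with
  | nil => simp [PySem.List.insertBy]
  | cons y ys ih =>
    rw [show PySem.List.insertBy pvBefore x (y :: ys) =
        if pvBefore x y then x :: y :: ys else y :: PySem.List.insertBy pvBefore x ys from rfl]
    rcases List.pairwise_cons.mp h with ⟨hy, hys⟩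
    split
    · rename_i hb
      refine List.pairwise_cons.mpr ⟨?_, h⟩
      intro z hz
      rcases List.mem_cons.mp hz with rfl | hz
      · exact pvBefore_true hb
      · exact pvLexLe_trans (pvBefore_true hb) (hy z hz)
    · rename_i hb
      refine List.pairwise_cons.mpr ⟨?_, ih hys⟩
      intro z hz
      rcases (PySem.List.insertBy_mem_iff pvBefore x z ys).mp hz with rfl | hz
      · exact pvBefore_false (Bool.not_eq_true _ ▸ hb)
      · exact hy z hz

theorem pv_sorted2_pairwise (l : List (Int × Int)) :
    (PySem.List.sorted2 l (fun p => p.1) (fun p => p.2) false).Pairwise pvLexLe := by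
  rw [pv_sorted2_eq_foldl]
  suffices h : ∀ acc : List (Int × Int), acc.Pairwise pvLexLe →
      (l.foldl (fun acc x => PySem.List.insertBy pvBefore x acc) acc).Pairwise pvLexLe from
    h [] (List.Pairwise.nil)
  induction l with
  | nil => intro acc h; exact h
  | cons x l ih => intro acc h; exact ih _ (pv_insertBy_pairwise x acc h)

-- the ≤-sorted rearrangement of a list of pairs is unique
theorem pv_sorted2_unique (l ys : List (Int × Int)) (hp : ys.Perm l) (hs : ys.Pairwise pvLexLe) :
    PySem.List.sorted2 l (fun p => p.1) (fun p => p.2) false = ys := by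
  refine List.Perm.eq_of_pairwise ?_ (pv_sorted2_pairwise l) hs
    ((PySem.List.sorted2_perm l _ _ false).trans hp.symm)
  intro a b _ _ h1 h2
  exact pvLexLe_antisymm h1 h2

-- min2? returns a lexicographic minimum
theorem pv_min2_ne_none_aux (step : Option (Int × Int) → Int × Int → Option (Int × Int))
    (hstep : ∀ a x, ∃ c, step (some a) x = some c) :
    ∀ (l : List (Int × Int)) (a : Int × Int), l.foldl step (some a) ≠ none := by
  intro l
  induction l with
  | nil => intro a h; cases h
  | cons x l ih =>
    intro a
    rcases hstep a x with ⟨c, hc⟩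
    rw [List.foldl_cons, hc]
    exact ih c

theorem pv_min2_ne_none (x : Int × Int) (t : List (Int × Int)) :
    PySem.List.min2? (x :: t) (fun p => p.1) (fun p => p.2) ≠ none := by
  unfold PySem.List.min2?
  rw [List.foldl_cons]
  refine pv_min2_ne_none_aux _ ?_ t x
  intro a y
  dsimp only
  split
  · exact ⟨y, rfl⟩
  · exact ⟨a, rfl⟩

theorem pv_min2_isMin_aux (step : Option (Int × Int) → Int × Int → Option (Int × Int))
    (hstep : ∀ acc x, (step acc x = some x ∧ ∀ a, acc = some a → pvLexLe x a)
      ∨ (∃ a, acc = some a ∧ step acc x = some a ∧ pvLexLe a x)) :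
    ∀ (l : List (Int × Int)) (acc : Option (Int × Int)) (m : Int × Int),
      l.foldl step acc = some m →
      (∀ a, acc = some a → pvLexLe m a) ∧ ∀ y ∈ l, pvLexLe m y := by
  intro l
  induction l with
  | nil =>
    intro acc m h
    simp only [List.foldl_nil] at h
    subst h
    refine ⟨fun a ha => ?_, by simp⟩
    rcases Option.some_inj.mp ha with rfl
    exact pvLexLe_refl _
  | cons x l ih =>
    intro acc m h
    rcases ih (step acc x) m h with ⟨h1, h2⟩
    have hmx : pvLexLe m x := by
      rcases hstep acc x with ⟨hs1, _⟩ | ⟨a, _, hs1, hax⟩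
      · exact h1 x hs1
      · exact pvLexLe_trans (h1 a hs1) hax
    refine ⟨?_, ?_⟩
    · intro a' ha'
      rcases hstep acc x with ⟨_, hs2⟩ | ⟨a, hacc, hs1, _⟩
      · exact pvLexLe_trans hmx (hs2 a' ha')
      · rw [hacc] at ha'
        rcases Option.some_inj.mp ha' with rfl
        exact h1 _ hs1
    · intro y hy
      rcases List.mem_cons.mp hy with rfl | hy
      · exact hmx
      · exact h2 y hy

theorem pv_min2_isMin (todo : List (Int × Int)) (m : Int × Int)
    (h : PySem.List.min2? todo (fun p => p.1) (fun p => p.2) = some m) :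
    ∀ y ∈ todo, pvLexLe m y := by
  unfold PySem.List.min2? at h
  refine (pv_min2_isMin_aux _ ?_ todo none m h).2
  intro acc x
  cases acc with
  | none => exact Or.inl ⟨rfl, by rintro a ⟨⟩⟩
  | some a =>
    dsimp only
    split
    · rename_i hb
      refine Or.inl ⟨rfl, fun a' ha' => ?_⟩
      rcases Option.some_inj.mp ha' with rfl
      simp at hb
      unfold pvLexLe
      omega
    · rename_i hb
      refine Or.inr ⟨a, rfl, rfl, ?_⟩
      simp at hb
      unfold pvLexLe
      omega

-- "F absorbs nothing of l": the closure's fixpoint predicate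
def pvClosed (F : Int) (l : List (Int × Int)) : Prop := ∀ p ∈ l, p.1 ≤ F → p.2 ≤ F

theorem pvClosed_perm {F : Int} {l l' : List (Int × Int)} (hp : l.Perm l')
    (h : pvClosed F l) : pvClosed F l' := fun p hp' => h p (hp.mem_iff.mpr hp')

-- one pass of the closure loop: grows, stays under any fixpoint, flags exactly the changes
theorem pvGrow_inv : ∀ (t : List (Int × Int)) (x : Int) (b : Bool),
    x ≤ (t.foldl (fun st p => if p.1 ≤ st.1 ∧ p.2 > st.1 then (p.2, true) else st) (x, b)).1
  ∧ (∀ F, pvClosed F t → x ≤ F →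
      (t.foldl (fun st p => if p.1 ≤ st.1 ∧ p.2 > st.1 then (p.2, true) else st) (x, b)).1 ≤ F)
  ∧ ((t.foldl (fun st p => if p.1 ≤ st.1 ∧ p.2 > st.1 then (p.2, true) else st) (x, b)) = (x, b)
      ∨ ((t.foldl (fun st p => if p.1 ≤ st.1 ∧ p.2 > st.1 then (p.2, true) else st) (x, b)).2 = true
        ∧ x < (t.foldl (fun st p => if p.1 ≤ st.1 ∧ p.2 > st.1 then (p.2, true) else st) (x, b)).1
        ∧ ∃ p ∈ t, p.2 = (t.foldl (fun st p => if p.1 ≤ st.1 ∧ p.2 > st.1 then (p.2, true) else st) (x, b)).1))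
  ∧ ((t.foldl (fun st p => if p.1 ≤ st.1 ∧ p.2 > st.1 then (p.2, true) else st) (x, b)) = (x, b)
      → pvClosed x t) := by
  intro t
  induction t with
  | nil =>
    intro x b
    refine ⟨le_refl _, fun F _ h => h, Or.inl rfl, fun _ => by simp [pvClosed]⟩
  | cons q t ih =>
    intro x b
    by_cases hq : q.1 ≤ x ∧ q.2 > x
    · simp only [List.foldl_cons, if_pos hq]
      rcases ih q.2 true with ⟨i1, i2, i3, _⟩
      refine ⟨le_trans (le_of_lt hq.2) i1, ?_, ?_, ?_⟩
      · intro F hF hxF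
        exact i2 F (fun p hp => hF p (List.mem_cons_of_mem q hp))
          (hF q (List.mem_cons_self) (le_trans hq.1 hxF))
      · right
        rcases i3 with h3 | ⟨h3a, h3b, p0, hp0, hp0e⟩
        · rw [h3]
          exact ⟨rfl, hq.2, q, List.mem_cons_self, rfl⟩
        · exact ⟨h3a, lt_trans hq.2 h3b, p0, List.mem_cons_of_mem q hp0, hp0e⟩
      · intro he
        exfalso
        have : q.2 ≤ x := by rw [he] at i1; exact i1
        omega
    · simp only [List.foldl_cons, if_neg hq]
      rcases ih x b with ⟨i1, i2, i3, i4⟩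
      refine ⟨i1, ?_, ?_, ?_⟩
      · intro F hF hxF
        exact i2 F (fun p hp => hF p (List.mem_cons_of_mem q hp)) hxF
      · rcases i3 with h3 | ⟨h3a, h3b, p0, hp0, hp0e⟩
        · exact Or.inl h3
        · exact Or.inr ⟨h3a, h3b, p0, List.mem_cons_of_mem q hp0, hp0e⟩
      · intro he p hp hpF
        rcases List.mem_cons.mp hp with rfl | hp
        · omega
        · exact i4 he p hp hpF

theorem pvGrow_le_of_closed {t : List (Int × Int)} {e F : Int} (hF : pvClosed F t) (he : e ≤ F) :
    (pvGrow t e).1 ≤ F := (pvGrow_inv t e false).2.1 F hF he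

theorem pvGrow_false {t : List (Int × Int)} {e : Int} (h : (pvGrow t e).2 = false) :
    (pvGrow t e).1 = e ∧ pvClosed e t := by
  rcases (pvGrow_inv t e false).2.2.1 with h3 | ⟨h3a, _, _⟩
  · exact ⟨congrArg Prod.fst h3, (pvGrow_inv t e false).2.2.2 h3⟩
  · rw [pvGrow] at h; rw [h3a] at h; cases h

theorem pvGrow_true {t : List (Int × Int)} {e : Int} (h : (pvGrow t e).2 = true) :
    e < (pvGrow t e).1 ∧ ∃ p ∈ t, p.2 = (pvGrow t e).1 := by
  rcases (pvGrow_inv t e false).2.2.1 with h3 | ⟨_, h3b, h3c⟩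
  · exfalso; rw [pvGrow] at h; rw [h3] at h; cases h
  · exact ⟨h3b, h3c⟩

-- strict countP decrease (used to bound the closure's rounds)
theorem pv_countP_lt {α : Type} (l : List α) (P Q : α → Bool)
    (himp : ∀ x ∈ l, P x = true → Q x = true) (x0 : α) (hx0 : x0 ∈ l)
    (hQ : Q x0 = true) (hP : P x0 = false) : l.countP P < l.countP Q := by
  obtain ⟨s, t', rfl⟩ := List.append_of_mem hx0
  rw [List.countP_append, List.countP_append, List.countP_cons, List.countP_cons]
  have h1 : s.countP P ≤ s.countP Q :=
    List.countP_mono_left (fun x hx => himp x (List.mem_append_left _ hx))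
  have h2 : t'.countP P ≤ t'.countP Q :=
    List.countP_mono_left (fun x hx =>
      himp x (List.mem_append_right _ (List.mem_cons_of_mem x0 hx)))
  rw [hP, hQ]
  simp only [Bool.false_eq_true, if_false, if_true]
  omega

theorem pvClosure_spec : ∀ (fuel : Nat) (t : List (Int × Int)) (e : Int),
    t.countP (fun p => decide (e < p.2)) ≤ fuel →
    e ≤ pvClosure fuel t e ∧ pvClosed (pvClosure fuel t e) t ∧
      (∀ F, pvClosed F t → e ≤ F → pvClosure fuel t e ≤ F) := by
  intro fuel
  induction fuel with
  | zero =>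
    intro t e h
    have h0 : t.countP (fun p => decide (e < p.2)) = 0 := Nat.le_zero.mp h
    refine ⟨le_refl _, ?_, fun F _ hF => hF⟩
    intro p hp _
    have := List.countP_eq_zero.mp h0 p hp
    simpa using this
  | succ fuel ih =>
    intro t e h
    have hunf : pvClosure (fuel + 1) t e =
        if (pvGrow t e).2 then pvClosure fuel t (pvGrow t e).1 else e := rfl
    rw [hunf]
    by_cases hg : (pvGrow t e).2 = true
    · rw [if_pos hg]
      rcases pvGrow_true hg with ⟨hlt, p0, hp0, hp0e⟩
      have hcnt : t.countP (fun p => decide ((pvGrow t e).1 < p.2)) ≤ fuel := by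
        have := pv_countP_lt t (fun p => decide ((pvGrow t e).1 < p.2))
          (fun p => decide (e < p.2))
          (by intro x _ hx; simp at hx ⊢; omega)
          p0 hp0 (by simp; omega) (by simp; omega)
        omega
      rcases ih t (pvGrow t e).1 hcnt with ⟨j1, j2, j3⟩
      refine ⟨le_trans (le_of_lt hlt) j1, j2, ?_⟩
      intro F hF heF
      exact j3 F hF (pvGrow_le_of_closed hF heF)
    · have hg' : (pvGrow t e).2 = false := Bool.not_eq_true _ ▸ hg
      rw [if_neg (by rw [hg']; exact Bool.false_ne_true)]
      exact ⟨le_refl _, (pvGrow_false hg').2, fun F _ hF => hF⟩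

-- the merged intervals A's loop produces after having started the group (s, e)
def pvGo : Int → Int → List (Int × Int) → List (Int × Int)
  | s, e, [] => [(s, e)]
  | s, e, q :: l => if q.1 > e then (s, e) :: pvGo q.1 q.2 l else pvGo s (max e q.2) l

theorem foldl_pvMergeStep (l : List (Int × Int)) :
    ∀ (acc : List (Int × Int)) (s e : Int),
      l.foldl pvMergeStep (acc ++ [(s, e)]) = acc ++ pvGo s e l := by
  induction l with
  | nil => intro acc s e; simp [pvGo]
  | cons q l ih =>
    intro acc s e
    simp only [List.foldl_cons, pvGo]
    have hstep : pvMergeStep (acc ++ [(s, e)]) q =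
        if q.1 > e then (acc ++ [(s, e)]) ++ [q] else acc ++ [(s, max e q.2)] := by
      simp [pvMergeStep]
    rw [hstep]
    split
    · rw [show (acc ++ [(s, e)]) ++ [q] = (acc ++ [(s, e)]) ++ [(q.1, q.2)] by simp,
        ih (acc ++ [(s, e)]) q.1 q.2]
      simp
    · exact ih acc s (max e q.2)

-- A's first merged group: its final end and the untouched suffix
def pvFG : Int → List (Int × Int) → Int × List (Int × Int)
  | e, [] => (e, [])
  | e, q :: l => if q.1 > e then (e, q :: l) else pvFG (max e q.2) l

theorem pvFG_ge : ∀ (l : List (Int × Int)) (e : Int), e ≤ (pvFG e l).1 := by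
  intro l
  induction l with
  | nil => intro e; exact le_refl _
  | cons q l ih =>
    intro e
    rw [pvFG]
    split
    · exact le_refl _
    · exact le_trans (le_max_left _ _) (ih (max e q.2))

theorem pvFG_le_of_closed : ∀ (l : List (Int × Int)) (e F : Int),
    pvClosed F l → e ≤ F → (pvFG e l).1 ≤ F := by
  intro l
  induction l with
  | nil => intro e F _ h; exact h
  | cons q l ih =>
    intro e F hF he
    rw [pvFG]
    split
    · exact he
    · rename_i hq
      refine ih _ F (fun p hp => hF p (List.mem_cons_of_mem q hp)) ?_
      have := hF q List.mem_cons_self (by omega)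
      omega

theorem pvFG_closed : ∀ (l : List (Int × Int)) (e : Int),
    l.Pairwise pvLexLe → pvClosed (pvFG e l).1 l := by
  intro l
  induction l with
  | nil => intro e _ p hp; cases hp
  | cons q l ih =>
    intro e hpw
    rcases List.pairwise_cons.mp hpw with ⟨hq, hl⟩
    rw [pvFG]
    split
    · rename_i hb
      intro p hp hp1
      exfalso
      rcases List.mem_cons.mp hp with rfl | hp
      · omega
      · have := hq p hp
        unfold pvLexLe at this
        omega
    · intro p hp hp1
      rcases List.mem_cons.mp hp with rfl | hp
      · have := pvFG_ge l (max e p.2)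
        omega
      · exact ih (max e q.2) hl p hp hp1

theorem pvFG_snd_filter : ∀ (l : List (Int × Int)) (e : Int),
    l.Pairwise pvLexLe →
      l.filter (fun p => decide (p.1 > (pvFG e l).1)) = (pvFG e l).2 := by
  intro l
  induction l with
  | nil => intro e _; rfl
  | cons q l ih =>
    intro e hpw
    rcases List.pairwise_cons.mp hpw with ⟨hq, hl⟩
    rw [pvFG]
    split
    · rename_i hb
      dsimp only
      rw [List.filter_cons_of_pos (by simpa using hb)]
      congr 1
      refine List.filter_eq_self.mpr ?_
      intro p hp
      have := hq p hp
      unfold pvLexLe at this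
      simp
      omega
    · rename_i hb
      rw [List.filter_cons_of_neg]
      · exact ih (max e q.2) hl
      · have := pvFG_ge l (max e q.2)
        simp only [decide_eq_true_eq]
        omega

theorem pvGo_eq_fg : ∀ (l : List (Int × Int)) (s e : Int),
    pvGo s e l = (s, (pvFG e l).1) ::
      (match (pvFG e l).2 with | [] => [] | q :: l' => pvGo q.1 q.2 l') := by
  intro l
  induction l with
  | nil => intro s e; rfl
  | cons q l ih =>
    intro s e
    rw [pvGo, pvFG]
    split
    · rfl
    · exact ih s (max e q.2)

-- the chunk intervals as a function of the interval multiset (via its sorted arrangement)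
def pvChunks (l : List (Int × Int)) : List (Int × Int) :=
  match PySem.List.sorted2 l (fun p => p.1) (fun p => p.2) false with
  | [] => []
  | m :: rest => pvGo m.1 m.2 rest

theorem pvLoop_nil (text : String) : pvLoop text [] = [] := by
  rw [pvLoop.eq_def]
  rfl

theorem pvLoop_eq (text : String) : ∀ (N : Nat) (todo : List (Int × Int)), todo.length ≤ N →
    pvLoop text todo =
      (pvChunks todo).map (fun p => PySem.Str.slice text (some p.1) (some p.2)) := by
  intro N
  induction N with
  | zero =>
    intro todo h
    have h0 : todo = [] := List.eq_nil_of_length_eq_zero (Nat.le_zero.mp h)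
    subst h0
    rw [pvLoop_nil]
    rfl
  | succ N ih =>
    intro todo hlen
    rcases eq_or_ne todo [] with rfl | h0
    · rw [pvLoop_nil]
      rfl
    · have hperm0 := PySem.List.sorted2_perm todo (fun p => p.1) (fun p => p.2) false
      obtain ⟨m0, rest, hs⟩ : ∃ m0 rest,
          PySem.List.sorted2 todo (fun p => p.1) (fun p => p.2) false = m0 :: rest := by
        rcases hl : PySem.List.sorted2 todo (fun p => p.1) (fun p => p.2) false with _ | ⟨m0, rest⟩
        · rw [hl] at hperm0
          exact absurd hperm0.symm.eq_nil h0
        · exact ⟨m0, rest, rfl⟩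
      have hperm : (m0 :: rest).Perm todo := hs ▸ hperm0
      have hpw : (m0 :: rest).Pairwise pvLexLe := hs ▸ pv_sorted2_pairwise todo
      have hm0mem : m0 ∈ todo := hperm.mem_iff.mp List.mem_cons_self
      have hm0min : ∀ y ∈ todo, pvLexLe m0 y := by
        intro y hy
        rcases List.mem_cons.mp (hperm.mem_iff.mpr hy) with rfl | hy'
        · exact pvLexLe_refl _
        · exact (List.pairwise_cons.mp hpw).1 y hy'
      obtain ⟨m, hm⟩ : ∃ m, PySem.List.min2? todo (fun p => p.1) (fun p => p.2) = some m := by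
        rcases ho : PySem.List.min2? todo (fun p => p.1) (fun p => p.2) with _ | m
        · rcases todo with _ | ⟨x, t⟩
          · exact absurd rfl h0
          · exact absurd ho (pv_min2_ne_none x t)
        · exact ⟨m, rfl⟩
      have hmm : m = m0 :=
        pvLexLe_antisymm (pv_min2_isMin todo m hm m0 hm0mem)
          (hm0min m (pv_min2_mem todo m hm))
      subst hmm
      have h1 : (PySem.List.remove? todo m).getD [] = todo.erase m := by
        rw [PySem.List.remove?_eq_some_erase todo m hm0mem]
        rfl
      have heraseperm : rest.Perm (todo.erase m) :=
        (hperm.trans (List.perm_cons_erase hm0mem)).cons_inv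
      have hrestpw : rest.Pairwise pvLexLe := (List.pairwise_cons.mp hpw).2
      have hcnt : (todo.erase m).countP (fun p => decide (m.2 < p.2)) ≤ (todo.erase m).length + 1 :=
        le_trans List.countP_le_length (Nat.le_succ _)
      obtain ⟨hc1, hc2, hc3⟩ := pvClosure_spec ((todo.erase m).length + 1) (todo.erase m) m.2 hcnt
      set E := pvClosure ((todo.erase m).length + 1) (todo.erase m) m.2 with hEdef
      set S := (pvFG m.2 rest).1 with hSdef
      have hSc : pvClosed S (todo.erase m) :=
        pvClosed_perm heraseperm (pvFG_closed rest m.2 hrestpw)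
      have hES : E = S := le_antisymm (hc3 S hSc (pvFG_ge rest m.2))
        (pvFG_le_of_closed rest m.2 E (pvClosed_perm heraseperm.symm hc2) hc1)
      have hfilter : PySem.List.sorted2 ((todo.erase m).filter (fun p => decide (p.1 > E)))
          (fun p => p.1) (fun p => p.2) false = (pvFG m.2 rest).2 := by
        apply pv_sorted2_unique
        · rw [← pvFG_snd_filter rest m.2 hrestpw, hES]
          exact (heraseperm.filter _)
        · rw [← pvFG_snd_filter rest m.2 hrestpw]
          exact hrestpw.filter _
      have hlen' : ((todo.erase m).filter (fun p => decide (p.1 > E))).length ≤ N := by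
        have e1 : (todo.erase m).length = todo.length - 1 := List.length_erase_of_mem hm0mem
        have e2 := List.length_filter_le (fun p => decide (p.1 > E)) (todo.erase m)
        have e3 : 0 < todo.length := List.length_pos_of_mem hm0mem
        omega
      have hchunks : pvChunks todo = (m.1, S) ::
          (match (pvFG m.2 rest).2 with | [] => [] | q :: l' => pvGo q.1 q.2 l') := by
        unfold pvChunks
        rw [hs]
        exact pvGo_eq_fg rest m.1 m.2
      have hchunks2 : pvChunks ((todo.erase m).filter (fun p => decide (p.1 > E))) =
          (match (pvFG m.2 rest).2 with | [] => [] | q :: l' => pvGo q.1 q.2 l') := by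
        unfold pvChunks
        rw [hfilter]
      rw [pvLoop.eq_def]
      split
      · rename_i heq
        rw [hm] at heq
        cases heq
      · rename_i m' heq
        rw [hm] at heq
        rcases Option.some_inj.mp heq with rfl
        simp only [h1]
        rw [ih _ hlen', hchunks2, hchunks, List.map_cons, ← hEdef, hES]

-- ===== VERDICT (by name: the statement is the Claim_ definition above) =====
theorem pvMerged_eq_chunks (l : List (Int × Int)) :
    (PySem.List.sorted2 l (fun p => p.1) (fun p => p.2) false).foldl pvMergeStep [] =
      pvChunks l := by
  unfold pvChunks
  cases h : PySem.List.sorted2 l (fun p => p.1) (fun p => p.2) false with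
  | nil => rfl
  | cons m rest =>
    have h1 : pvMergeStep [] m = [] ++ [(m.1, m.2)] := by simp [pvMergeStep]
    rw [List.foldl_cons, h1, foldl_pvMergeStep rest [] m.1 m.2, List.nil_append]

theorem slice_by_spans_spec : Claim_equal_slice_by_spans := by
  intro text spans window _
  unfold Spec_slice_by_spans slice_by_spans slice_by_spans_alt
  by_cases hs : spans = []
  · simp [hs]
  · simp only [if_neg hs]
    rw [PySem.List.foldl_append_singleton_eq_map
      (fun p => (max 0 (p.1 - window), min (PySem.Str.len text) (p.2 + window))) spans []]
    simp only [List.nil_append]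
    rw [pvMerged_eq_chunks, pvLoop_eq text _ _ (le_refl _)]
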